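-- pv_equiv track=rewrite | github.com/beedev/dbnotebook-v2 | dbnotebook/core/stateless/memory.py | format_history_for_context
-- ===== SOURCE A (Python) =====
-- from typing import List, Dict, Optional, Any
--
-- def format_history_for_context(
--     history: List[Dict[str, str]],
--     max_chars: int = 4000,
-- ) -> str:
--     """Format conversation history as context string.
--
--     Truncates to fit within character limit while keeping most recent turns.
--
--     Args:
--         history: List of {"role": str, "content": str}
--         max_chars: Maximum characters for formatted history
--
--     Returns:
--         Formatted history string
--     """
--     if not history:
--         return ""
--
--     formatted_turns = []
--     for msg in history:
--         role = msg.get("role", "unknown").capitalize()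
--         content = msg.get("content", "")
--         formatted_turns.append(f"{role}: {content}")
--
--     # Join and truncate
--     full_history = "\n\n".join(formatted_turns)
--
--     if len(full_history) <= max_chars:
--         return full_history
--
--     # If too long, keep the most recent turns
--     while len(full_history) > max_chars and formatted_turns:
--         formatted_turns.pop(0)  # Remove oldest
--         full_history = "\n\n".join(formatted_turns)
--
--     return full_history
-- ===== SOURCE B (Python) =====
-- def format_history_for_context(history, max_chars=4000):
--     """One backward pass: count how many newest turns fit, then join once."""
--     turns = [
--         f"{msg.get('role', 'unknown').capitalize()}: {msg.get('content', '')}"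
--         for msg in history
--     ]
--     total = -2  # joined length of k turns = sum(len) + 2*(k-1)
--     keep = 0
--     for t in reversed(turns):
--         if total + len(t) + 2 > max_chars:
--             break
--         total += len(t) + 2
--         keep += 1
--     return "\n\n".join(turns[len(turns) - keep:])
-- ===== Notes on version B (the rewrite author's own statement) =====
-- stated objective: alternative
-- what changed: A pops the oldest turn and re-joins the whole remaining list until it fits; B makes one backward pass over the formatted turns accumulating suffix lengths to find how many newest turns fit, then joins once.
import Mathlib
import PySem

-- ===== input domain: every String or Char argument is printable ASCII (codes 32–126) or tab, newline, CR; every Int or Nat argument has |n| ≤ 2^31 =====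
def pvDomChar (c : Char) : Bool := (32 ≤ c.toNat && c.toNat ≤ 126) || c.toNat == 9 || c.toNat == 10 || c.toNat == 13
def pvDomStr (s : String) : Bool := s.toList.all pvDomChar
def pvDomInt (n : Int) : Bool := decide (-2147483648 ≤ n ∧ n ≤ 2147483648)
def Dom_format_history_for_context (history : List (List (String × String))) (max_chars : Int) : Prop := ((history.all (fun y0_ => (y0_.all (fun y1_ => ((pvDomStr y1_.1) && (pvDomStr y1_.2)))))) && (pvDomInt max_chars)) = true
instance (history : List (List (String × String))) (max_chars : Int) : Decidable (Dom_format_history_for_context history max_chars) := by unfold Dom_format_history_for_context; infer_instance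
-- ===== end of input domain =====

-- B replaces A's pop-and-rejoin loop by one backward pass counting how many newest
-- turns fit, followed by a single join; return values are identical.

-- shared formatting helper (both Pythons format a turn the same way):
-- s.capitalize() — exact on the ASCII domain: first char upper-cased, rest lower-cased
def pvCapitalize (s : String) : String :=
  match s.toList with
  | [] => s
  | c :: cs => String.ofList (PySem.Chars.upperChar c :: PySem.Chars.lower cs)

-- f"{msg.get('role','unknown').capitalize()}: {msg.get('content','')}"
def pvFmtTurn (msg : List (String × String)) : String :=
  String.ofList ((pvCapitalize ((PySem.Dict.ofList msg).getD "role" "unknown")).toList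
    ++ ": ".toList ++ ((PySem.Dict.ofList msg).getD "content" "").toList)

-- ===== PORT A =====
-- while len(full_history) > max_chars and formatted_turns: pop(0); full_history = "\n\n".join(...)
def fhcLoop (max_chars : Int) : List String → String → String
  | [], full => full
  | _ :: rest, full =>
      if PySem.Str.len full > max_chars then fhcLoop max_chars rest (PySem.Str.join "\n\n" rest)
      else full

def format_history_for_context (history : List (List (String × String))) (max_chars : Int) : String :=
  if history = [] then ""
  else
    let formatted_turns := history.map pvFmtTurn
    let full_history := PySem.Str.join "\n\n" formatted_turns
    if PySem.Str.len full_history ≤ max_chars then full_history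
    else fhcLoop max_chars formatted_turns full_history

-- ===== PORT B =====
-- one backward pass: stop before the first (newest-to-oldest) turn that would overflow
def fhcPick (max_chars : Int) : List String → Int → Nat → Nat
  | [], _, keep => keep
  | t :: rest, total, keep =>
      if total + PySem.Str.len t + 2 > max_chars then keep
      else fhcPick max_chars rest (total + PySem.Str.len t + 2) (keep + 1)

def format_history_for_context_alt (history : List (List (String × String))) (max_chars : Int) : String :=
  let turns := history.map pvFmtTurn
  let keep := fhcPick max_chars turns.reverse (-2) 0
  PySem.Str.join "\n\n" (PySem.List.slice turns (some ((turns.length - keep : Nat) : Int)) none)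

-- ===== PRECONDITION & SPEC =====
def Spec_format_history_for_context (history : List (List (String × String))) (max_chars : Int) (out : String) : Prop := out = format_history_for_context_alt history max_chars
instance (history : List (List (String × String))) (max_chars : Int) (out : String) : Decidable (Spec_format_history_for_context history max_chars out) := by unfold Spec_format_history_for_context; infer_instance

-- ===== CLAIM (what is proved, stated in full; the proofs are below) =====
def Claim_equal_format_history_for_context : Prop := ∀ (history : List (List (String × String))) (max_chars : Int), Dom_format_history_for_context history max_chars → Spec_format_history_for_context history max_chars (format_history_for_context history max_chars)

-- ===== LEMMAS AND PROOFS =====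

-- the truncation A performs, as a function on the formatted-turn list
def fhcS (m : Int) : List String → List String
  | [] => []
  | t :: rest =>
      if PySem.Str.len (PySem.Str.join "\n\n" (t :: rest)) ≤ m then t :: rest
      else fhcS m rest

-- cost of a turn inside a joined suffix (its length plus one separator)
def fhcCost (ts : List String) : Int := (ts.map (fun t => PySem.Str.len t + 2)).sum

lemma fhcLen_nonneg (s : String) : 0 ≤ PySem.Str.len s := by
  rw [PySem.Str.len_eq]; exact_mod_cast Nat.zero_le _

lemma fhcJoin_len_cons (t : String) (rest : List String) (h : rest ≠ []) :
    PySem.Str.len (PySem.Str.join "\n\n" (t :: rest)) =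
      PySem.Str.len t + 2 + PySem.Str.len (PySem.Str.join "\n\n" rest) := by
  obtain ⟨q, rest', rfl⟩ : ∃ q rest', rest = q :: rest' := by
    cases rest with
    | nil => exact absurd rfl h
    | cons q rest' => exact ⟨q, rest', rfl⟩
  simp only [PySem.Str.len_eq, PySem.Str.toList_join, List.map_cons]
  rw [PySem.Chars.join_cons_cons]
  simp [List.length_append]
  omega

lemma fhcJoin_le_cons (t : String) (rest : List String) :
    PySem.Str.len (PySem.Str.join "\n\n" rest) ≤ PySem.Str.len (PySem.Str.join "\n\n" (t :: rest)) := by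
  cases rest with
  | nil =>
      simp only [PySem.Str.len_eq, PySem.Str.toList_join, List.map_cons, List.map_nil,
        PySem.Chars.join_singleton, PySem.Chars.join_nil]
      exact_mod_cast Nat.zero_le _
  | cons q rest' =>
      rw [fhcJoin_len_cons t (q :: rest') (by simp)]
      have := fhcLen_nonneg t
      omega

lemma fhcCost_eq (ts : List String) (h : ts ≠ []) :
    fhcCost ts = PySem.Str.len (PySem.Str.join "\n\n" ts) + 2 := by
  induction ts with
  | nil => exact absurd rfl h
  | cons t rest ih =>
      by_cases hr : rest = []
      · subst hr
        simp only [fhcCost, List.map_cons, List.map_nil, List.sum_cons, List.sum_nil,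
          PySem.Str.len_eq, PySem.Str.toList_join, PySem.Chars.join_singleton]
        ring
      · rw [fhcJoin_len_cons t rest hr]
        have := ih hr
        simp only [fhcCost, List.map_cons, List.sum_cons] at *
        omega

lemma fhcS_suffix (m : Int) (ts : List String) : fhcS m ts <:+ ts := by
  induction ts with
  | nil => simp [fhcS]
  | cons t rest ih =>
      rw [fhcS]
      split_ifs with h
      · exact List.suffix_refl _
      · exact ih.trans (List.suffix_cons t rest)

lemma fhcS_length_le (m : Int) (ts : List String) : (fhcS m ts).length ≤ ts.length :=
  (fhcS_suffix m ts).length_le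

-- A's pop loop computes the join of fhcS
lemma fhcLoop_eq (m : Int) (ts : List String) :
    fhcLoop m ts (PySem.Str.join "\n\n" ts) = PySem.Str.join "\n\n" (fhcS m ts) := by
  induction ts with
  | nil => simp [fhcLoop, fhcS]
  | cons t rest ih =>
      rw [fhcLoop, fhcS]
      split_ifs with h h2 h3
      · omega
      · exact ih
      · rfl
      · omega

lemma fhcPick_bounds (m : Int) (u : List String) : ∀ total keep,
    keep ≤ fhcPick m u total keep ∧ fhcPick m u total keep ≤ keep + u.length := by
  induction u with
  | nil => intro total keep; simp [fhcPick]
  | cons t rest ih =>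
      intro total keep
      rw [fhcPick]
      split_ifs with h
      · simp
      · have := ih (total + PySem.Str.len t + 2) (keep + 1)
        simp only [List.length_cons]
        omega

lemma fhcPick_append (m : Int) (u v : List String) : ∀ total keep,
    fhcPick m (u ++ v) total keep =
      if fhcPick m u total keep < keep + u.length
      then fhcPick m u total keep
      else fhcPick m v (total + fhcCost u) (keep + u.length) := by
  induction u with
  | nil =>
      intro total keep
      simp [fhcPick, fhcCost]
  | cons t rest ih =>
      intro total keep
      rw [List.cons_append, fhcPick, fhcPick]
      by_cases h : total + PySem.Str.len t + 2 > m
      · rw [if_pos h, if_pos h, if_pos (by simp only [List.length_cons]; omega)]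
      · rw [if_neg h, if_neg h, ih]
        have hb := fhcPick_bounds m rest (total + PySem.Str.len t + 2) (keep + 1)
        by_cases h3 : fhcPick m rest (total + PySem.Str.len t + 2) (keep + 1) < keep + 1 + rest.length
        · rw [if_pos h3, if_pos (by simp only [List.length_cons]; omega)]
        · rw [if_neg h3, if_neg (by simp only [List.length_cons]; omega)]
          have ht : total + PySem.Str.len t + 2 + fhcCost rest = total + fhcCost (t :: rest) := by
            simp only [fhcCost, List.map_cons, List.sum_cons]; ring
          rw [ht]
          congr 1
          simp only [List.length_cons]
          omega

lemma fhcPick_eq_S (m : Int) (ts : List String) :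
    fhcPick m ts.reverse (-2) 0 = (fhcS m ts).length := by
  induction ts with
  | nil => simp [fhcPick, fhcS]
  | cons t rest ih =>
      have hrevlen : rest.reverse.length = rest.length := by simp
      have hcostrev : fhcCost rest.reverse = fhcCost rest := by
        simp [fhcCost, List.map_reverse]
      rw [List.reverse_cons, fhcPick_append, ih, hrevlen, hcostrev]
      by_cases hlt : (fhcS m rest).length < 0 + rest.length
      · -- not all of rest fits: the whole list does not fit either
        rw [if_pos hlt]
        have hrest_ne : rest ≠ [] := by
          intro hr; subst hr; simp [fhcS] at hlt
        have hgt : ¬ PySem.Str.len (PySem.Str.join "\n\n" rest) ≤ m := by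
          intro hle
          have : fhcS m rest = rest := by
            cases rest with
            | nil => exact absurd rfl hrest_ne
            | cons q rest' => rw [fhcS, if_pos hle]
          rw [this] at hlt; omega
        have hgt2 : ¬ PySem.Str.len (PySem.Str.join "\n\n" (t :: rest)) ≤ m := by
          have := fhcJoin_le_cons t rest
          omega
        rw [fhcS, if_neg hgt2]
      · -- all of rest was consumed: its accumulated total is the joined length of rest
        rw [if_neg hlt]
        have hall : fhcS m rest = rest :=
          (fhcS_suffix m rest).eq_of_length (by
            have := fhcS_length_le m rest
            omega)
        have harith : -2 + fhcCost rest + PySem.Str.len t + 2 =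
            PySem.Str.len (PySem.Str.join "\n\n" (t :: rest)) := by
          by_cases hr : rest = []
          · subst hr
            simp only [fhcCost, List.map_nil, List.sum_nil, PySem.Str.len_eq,
              PySem.Str.toList_join, List.map_cons, PySem.Chars.join_singleton]
            ring
          · rw [fhcCost_eq rest hr, fhcJoin_len_cons t rest hr]
            ring
        rw [fhcPick, fhcPick]
        split_ifs with h
        · rw [fhcS, if_neg (by omega), hall]
          omega
        · rw [fhcS, if_pos (by omega)]
          simp only [List.length_cons]
          omega

lemma fhcDrop_of_suffix {ts l : List String} (h : l <:+ ts) :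
    ts.drop (ts.length - l.length) = l := by
  obtain ⟨p, rfl⟩ := h
  simp

theorem format_history_for_context_spec_aux (history : List (List (String × String))) (m : Int) :
    format_history_for_context history m = format_history_for_context_alt history m := by
  simp only [format_history_for_context, format_history_for_context_alt]
  rw [PySem.List.slice_from_natCast, fhcPick_eq_S,
    fhcDrop_of_suffix (fhcS_suffix m (history.map pvFmtTurn))]
  by_cases hh : history = []
  · subst hh
    rfl
  · rw [if_neg hh]
    split_ifs with h
    · -- full history fits: fhcS keeps everything
      have hne : history.map pvFmtTurn ≠ [] := by simp [hh]
      cases hmap : history.map pvFmtTurn with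
      | nil => exact absurd hmap hne
      | cons q rest =>
          rw [hmap] at h
          rw [fhcS, if_pos h]
    · exact fhcLoop_eq m (history.map pvFmtTurn)

-- ===== VERDICT (by name: the statement is the Claim_ definition above) =====
theorem format_history_for_context_spec : Claim_equal_format_history_for_context := by
  intro history max_chars _
  unfold Spec_format_history_for_context
  exact format_history_for_context_spec_aux history max_chars
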